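-- pv_equiv track=rewrite | github.com/aaro888-icefalcon/Equilibrium | emergence/engine/narrator/validation.py | check_no_rhetorical_questions
-- ===== SOURCE A (Python) =====
-- from typing import Any, Dict, List, Tuple
--
-- def check_no_rhetorical_questions(prose: str) -> List[str]:
--     """Prose sentences ending in '?' outside quoted dialogue are flagged."""
--     violations: List[str] = []
--     quote_tracker = 0
--     current = ""
--     in_quote = False
--     # Very light parser: split text into segments outside quotes.
--     for ch in prose:
--         if ch == '"':
--             if not in_quote and current.rstrip().endswith("?"):
--                 violations.append(
--                     f"rhetorical question in narrator prose: '{current.strip()[-60:]}'"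
--                 )
--             current = ""
--             in_quote = not in_quote
--             continue
--         current += ch
--         quote_tracker += 0
--     if not in_quote and current.strip().endswith("?"):
--         violations.append(
--             f"rhetorical question in narrator prose: '{current.strip()[-60:]}'"
--         )
--     return violations
-- ===== SOURCE B (Python) =====
-- from typing import List
--
-- def check_no_rhetorical_questions(prose: str) -> List[str]:
--     """Prose sentences ending in '?' outside quoted dialogue are flagged."""
--     violations: List[str] = []
--     for i, seg in enumerate(prose.split('"')):
--         if i % 2 == 0:  # even-indexed segments lie outside quotes
--             s = seg.strip()
--             if s.endswith("?"):
--                 violations.append(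
--                     f"rhetorical question in narrator prose: '{s[-60:]}'"
--                 )
--     return violations
-- ===== Notes on version B (the rewrite author's own statement) =====
-- stated objective: simpler
-- what changed: Replaces the character-by-character quote state machine (mutable current/in_quote state with per-char string concatenation) with a single split on the double-quote character and one pass that checks only the even-indexed, outside-quote segments; the dead quote_tracker line is dropped.
import Mathlib
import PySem

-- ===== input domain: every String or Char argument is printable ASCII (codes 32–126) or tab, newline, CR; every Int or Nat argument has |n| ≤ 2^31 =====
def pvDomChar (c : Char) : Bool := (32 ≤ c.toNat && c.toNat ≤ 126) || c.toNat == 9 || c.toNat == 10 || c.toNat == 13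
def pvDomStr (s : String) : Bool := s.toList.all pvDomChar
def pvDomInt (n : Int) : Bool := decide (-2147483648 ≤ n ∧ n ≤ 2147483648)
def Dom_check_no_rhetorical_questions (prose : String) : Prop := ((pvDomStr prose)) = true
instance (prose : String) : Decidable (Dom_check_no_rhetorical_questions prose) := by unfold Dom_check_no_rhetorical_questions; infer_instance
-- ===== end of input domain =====

-- B replaces A's char-by-char quote state machine with split-on-'"' plus a scan of the
-- even-indexed (outside-quote) segments; objective: simpler. Equivalence proved on all inputs.

-- shared f-string helper: "rhetorical question in narrator prose: '" + s[-60:] + "'"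
def pvMsg (s : List Char) : String :=
  String.ofList ("rhetorical question in narrator prose: '".toList
    ++ PySem.List.slice s (some (-60)) none ++ ['\''])

-- ===== PORT A =====
-- loop body of A's for-loop; state = (violations, current, in_quote)
def pvStepA (st : List String × List Char × Bool) (ch : Char) :
    List String × List Char × Bool :=
  if ch = '"' then
    if !st.2.2 && PySem.Chars.endswith (PySem.Chars.rstrip st.2.1) ['?'] then
      (st.1 ++ [pvMsg (PySem.Chars.strip st.2.1)], [], !st.2.2)
    else
      (st.1, [], !st.2.2)
  else
    (st.1, st.2.1 ++ [ch], st.2.2)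

def check_no_rhetorical_questions (prose : String) : List String :=
  let fin := prose.toList.foldl pvStepA ([], [], false)
  if !fin.2.2 && PySem.Chars.endswith (PySem.Chars.strip fin.2.1) ['?'] then
    fin.1 ++ [pvMsg (PySem.Chars.strip fin.2.1)]
  else
    fin.1

-- ===== PORT B =====
def check_no_rhetorical_questions_alt (prose : String) : List String :=
  (PySem.List.enumerate (PySem.Chars.splitOn prose.toList ['"']) 0).foldl
    (fun out p =>
      if PySem.Int.mod p.1 2 = 0 then
        let s := PySem.Chars.strip p.2
        if PySem.Chars.endswith s ['?'] then out ++ [pvMsg s] else out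
      else out) []

-- ===== PRECONDITION & SPEC =====
def Spec_check_no_rhetorical_questions (prose : String) (out : List String) : Prop := out = check_no_rhetorical_questions_alt prose
instance (prose : String) (out : List String) : Decidable (Spec_check_no_rhetorical_questions prose out) := by unfold Spec_check_no_rhetorical_questions; infer_instance

-- ===== CLAIM (what is proved, stated in full; the proofs are below) =====
def Claim_equal_check_no_rhetorical_questions : Prop := ∀ (prose : String), Dom_check_no_rhetorical_questions prose → Spec_check_no_rhetorical_questions prose (check_no_rhetorical_questions prose)

-- ===== LEMMAS AND PROOFS =====

-- structural reformulation of str.split('"') (proved equal to PySem.Chars.splitOn below)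
def pvSplit (pre : List Char) : List Char → List (List Char)
  | [] => [pre]
  | c :: rest => if c = '"' then pre :: pvSplit [] rest else pvSplit (pre ++ [c]) rest

-- the flagged messages contributed by one outside-quote segment
def pvChk (s : List Char) : List String :=
  if PySem.Chars.endswith (PySem.Chars.strip s) ['?'] then [pvMsg (PySem.Chars.strip s)] else []

-- flags of a segment list, alternating outside/inside quotes (q = currently inside a quote)
def pvSegs (q : Bool) : List (List Char) → List String
  | [] => []
  | s :: rest => (if q then [] else pvChk s) ++ pvSegs (!q) rest

-- A's trailing final check, as a function of the loop's final state
def pvFinA (st : List String × List Char × Bool) : List String :=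
  if !st.2.2 && PySem.Chars.endswith (PySem.Chars.strip st.2.1) ['?'] then
    st.1 ++ [pvMsg (PySem.Chars.strip st.2.1)]
  else st.1

-- === splitOn characterized structurally ===
theorem pv_go_spec (l : List Char) : ∀ (fuel : Nat) (cur : List Char) (acc : List (List Char)),
    l.length < fuel →
    PySem.Chars.splitOn.go ['"'] fuel l cur acc = acc.reverse ++ pvSplit cur.reverse l := by
  induction l with
  | nil =>
    intro fuel cur acc h
    cases fuel with
    | zero => omega
    | succ f => simp [PySem.Chars.splitOn.go, pvSplit]
  | cons c rest ih =>
    intro fuel cur acc h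
    cases fuel with
    | zero => omega
    | succ f =>
      rw [PySem.Chars.splitOn.go]
      by_cases hc : c = '"'
      · subst hc
        rw [if_pos (by simp)]
        simp only [List.length_cons, List.drop_succ_cons, List.length_nil, List.drop_zero]
        rw [ih f [] (cur.reverse :: acc) (by simp at h; omega)]
        simp [pvSplit]
      · have hpf : (['"'].isPrefixOf (c :: rest)) = false := by
          simp [List.isPrefixOf]; intro h'; exact absurd h'.symm hc
        rw [if_neg (by simp [hpf])]
        rw [ih f (c :: cur) acc (by simp at h; omega)]
        simp [pvSplit, hc]

theorem pv_splitOn_eq (cs : List Char) : PySem.Chars.splitOn cs ['"'] = pvSplit [] cs := by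
  rw [PySem.Chars.splitOn.eq_1, pv_go_spec cs (cs.length + 1) [] [] (by omega)]
  simp

-- === rstrip and strip agree on the trailing-'?' test ===
theorem pv_endswith_q (X : List Char) : PySem.Chars.endswith X ['?'] = (X.getLast? == some '?') := by
  rw [PySem.Chars.endswith, Bool.eq_iff_iff, List.isSuffixOf_iff_suffix, beq_iff_eq]
  constructor
  · rintro ⟨t, rfl⟩; simp
  · intro h
    obtain ⟨l', rfl⟩ := List.getLast?_eq_some_iff.mp h
    exact ⟨l', rfl⟩

theorem pv_rstrip_cons (c : Char) (t : List Char) :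
    PySem.Chars.rstrip (c :: t) =
      if PySem.Chars.rstrip t = [] then (if PySem.Chars.isspace c then [] else [c])
      else c :: PySem.Chars.rstrip t := by
  simp only [PySem.Chars.rstrip, List.reverse_cons, List.dropWhile_append]
  by_cases h : (List.dropWhile PySem.Chars.isspace t.reverse) = []
  · simp [h, List.dropWhile]
    by_cases hc : PySem.Chars.isspace c <;> simp [hc]
  · simp [List.isEmpty_iff, h]

theorem pv_getLast?_rstrip_lstrip (s : List Char) :
    (PySem.Chars.rstrip (PySem.Chars.lstrip s)).getLast? = (PySem.Chars.rstrip s).getLast? := by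
  induction s with
  | nil => rfl
  | cons c t ih =>
    by_cases hc : PySem.Chars.isspace c
    · have hl : PySem.Chars.lstrip (c :: t) = PySem.Chars.lstrip t := by
        simp [PySem.Chars.lstrip, List.dropWhile, hc]
      rw [hl, ih, pv_rstrip_cons]
      by_cases h : PySem.Chars.rstrip t = []
      · simp [h, hc]
      · rw [if_neg h]
        cases hrt : PySem.Chars.rstrip t with
        | nil => exact absurd hrt h
        | cons d u => simp [List.getLast?_cons_cons]
    · have hl : PySem.Chars.lstrip (c :: t) = c :: t := by
        simp [PySem.Chars.lstrip, List.dropWhile, hc]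
      rw [hl]

theorem pv_endswith_rstrip_eq (s : List Char) :
    PySem.Chars.endswith (PySem.Chars.rstrip s) ['?'] =
      PySem.Chars.endswith (PySem.Chars.strip s) ['?'] := by
  rw [pv_endswith_q, pv_endswith_q, PySem.Chars.strip, pv_getLast?_rstrip_lstrip]

-- === A's loop computes pvSegs over pvSplit ===
theorem pv_foldA_spec (l : List Char) : ∀ (q : Bool) (cur : List Char) (v : List String),
    pvFinA (l.foldl pvStepA (v, cur, q)) = v ++ pvSegs q (pvSplit cur l) := by
  induction l with
  | nil =>
    intro q cur v
    cases q <;> simp [pvFinA, pvSplit, pvSegs, pvChk] <;> split <;> simp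
  | cons c t ih =>
    intro q cur v
    by_cases hc : c = '"'
    · subst hc
      have hst : pvStepA (v, cur, q) '"' =
          (v ++ (if q then [] else pvChk cur), [], !q) := by
        cases q <;>
          simp [pvStepA, pvChk, pv_endswith_rstrip_eq] <;> split <;> simp
      rw [List.foldl_cons, hst, ih]
      simp [pvSplit, pvSegs]
    · have hst : pvStepA (v, cur, q) c = (v, cur ++ [c], q) := by
        simp [pvStepA, hc]
      rw [List.foldl_cons, hst, ih]
      simp [pvSplit, hc]

-- === B's loop computes pvSegs with index parity ===
theorem pv_foldB_spec (segs : List (List Char)) : ∀ (n : Int) (out : List String),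
    (PySem.List.enumerate segs n).foldl
      (fun out p =>
        if PySem.Int.mod p.1 2 = 0 then
          let s := PySem.Chars.strip p.2
          if PySem.Chars.endswith s ['?'] then out ++ [pvMsg s] else out
        else out) out
      = out ++ pvSegs (!(PySem.Int.mod n 2 == 0)) segs := by
  induction segs with
  | nil => intro n out; simp [PySem.List.enumerate_nil, pvSegs]
  | cons s rest ih =>
    intro n out
    rw [PySem.List.enumerate_cons, List.foldl_cons, ih]
    have hmod : ∀ m : Int, PySem.Int.mod m 2 = m % 2 :=
      fun m => PySem.Int.mod_eq_emod_of_pos (by omega)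
    have hpar : (!(PySem.Int.mod (n+1) 2 == 0)) = (PySem.Int.mod n 2 == 0) := by
      rw [hmod, hmod]
      rcases Int.emod_two_eq_zero_or_one n with h | h <;> simp [h] <;> omega
    rw [hpar]
    by_cases h0 : PySem.Int.mod n 2 = 0
    · simp only [pvSegs, h0, if_pos, beq_self_eq_true, Bool.not_true]
      simp [pvChk, h0]
      split <;> simp
    · have hb : (PySem.Int.mod n 2 == 0) = false := beq_eq_false_iff_ne.mpr h0
      rw [if_neg h0, hb]
      simp [pvSegs]

theorem pv_main (prose : String) :
    check_no_rhetorical_questions prose = check_no_rhetorical_questions_alt prose := by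
  show pvFinA (prose.toList.foldl pvStepA ([], [], false)) = _
  rw [pv_foldA_spec, check_no_rhetorical_questions_alt, pv_foldB_spec, pv_splitOn_eq]
  have h0 : PySem.Int.mod 0 2 = 0 := by decide
  simp [h0]

-- ===== VERDICT (by name: the statement is the Claim_ definition above) =====
theorem check_no_rhetorical_questions_spec : Claim_equal_check_no_rhetorical_questions := by
  intro prose _
  show check_no_rhetorical_questions prose = check_no_rhetorical_questions_alt prose
  exact pv_main prose
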